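-- pv_equiv track=rewrite | github.com/autosub-team/autosub | src/tasks/implementation/VHDL/fsm/scripts/generateTask.py | is_done
-- ===== SOURCE A (Python) =====
-- def is_done(nodes, num_nodes):
--    # check if all nodes have an outgoing edge:
--    for i in range(0, num_nodes):
--       for j in range(1, num_nodes): # outgoing edge may only be to n>0!
--          if (nodes[i][j] == 1) and (i != j):
--             break
--          if j == num_nodes-1:
--             return False # -> found at least one node that has no outgoing edge.
--
--    # check if all nodes except START have an incoming edge:
--    for j in range(1, num_nodes):
--        for i in range(1, num_nodes):
--          if (nodes[i][j]==1) and (i != j):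
--             break
--          if i == num_nodes-1:
--             return False # -> found at least one node that has no incoming edge.
--
--    return True
-- ===== SOURCE B (Python) =====
-- def is_done(nodes, num_nodes):
--     # Single sweep over the matrix building outgoing/incoming flag tables,
--     # then a verification pass; START (node 0) is exempt from incoming edges.
--     if num_nodes < 2:
--         return True  # nothing to check with fewer than two nodes
--     has_out = [False] * num_nodes
--     has_in = [False] * num_nodes
--     for i in range(num_nodes):
--         for j in range(1, num_nodes):
--             if nodes[i][j] == 1 and i != j:
--                 has_out[i] = True
--                 if i != 0:
--                     has_in[j] = True
--     return all(has_out) and all(has_in[1:])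
-- ===== Notes on version B (the rewrite author's own statement) =====
-- stated objective: alternative
-- what changed: Replaces A's two sentinel-and-break nested loops (early return on the j==num_nodes-1 check) with one sweep over the matrix that fills two boolean flag tables has_out/has_in, followed by a separate verification pass (all(has_out) and all(has_in[1:])).
-- outside the precondition, e.g. on is_done([[0, 0], [0]], 2): A returns False, B raises IndexError
import Mathlib
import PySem

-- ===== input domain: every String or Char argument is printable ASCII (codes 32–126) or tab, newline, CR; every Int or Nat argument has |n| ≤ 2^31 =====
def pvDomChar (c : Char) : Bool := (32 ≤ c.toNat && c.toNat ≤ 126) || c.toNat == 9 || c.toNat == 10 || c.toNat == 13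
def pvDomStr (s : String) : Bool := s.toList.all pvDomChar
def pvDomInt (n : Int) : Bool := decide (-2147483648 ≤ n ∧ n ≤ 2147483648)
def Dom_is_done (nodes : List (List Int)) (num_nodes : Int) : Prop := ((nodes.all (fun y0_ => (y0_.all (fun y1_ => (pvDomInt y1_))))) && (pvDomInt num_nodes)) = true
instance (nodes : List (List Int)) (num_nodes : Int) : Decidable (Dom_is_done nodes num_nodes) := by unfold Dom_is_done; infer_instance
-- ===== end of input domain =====

-- B replaces A's sentinel-and-break nested loops by one sweep building two boolean
-- flag tables (has_out/has_in) plus a verification pass; alternative decomposition, same cost.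


-- ===== PORT A =====
-- nodes[i][j]; under Pre_is_done every access is in range, so the getD defaults never apply
def pvGet (nodes : List (List Int)) (i j : Int) : Int :=
  PySem.List.pyGetD (PySem.List.pyGetD nodes i []) j 0

-- the shared test "(nodes[i][j] == 1) and (i != j)" both Pythons spell out
def pvEdge (nodes : List (List Int)) (i j : Int) : Bool :=
  pvGet nodes i j == 1 && !(i == j)

-- inner "for j in range(1, num_nodes)" of A's first loop: none = loop ended/broke, some b = "return b"
def pvA_inner1 (nodes : List (List Int)) (n i : Int) : List Int → Option Bool
  | [] => none
  | j :: js =>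
    if pvEdge nodes i j then none
    else if j == n - 1 then some false
    else pvA_inner1 nodes n i js

-- outer "for i in range(0, num_nodes)" of A's first loop
def pvA_loop1 (nodes : List (List Int)) (n : Int) : List Int → Option Bool
  | [] => none
  | i :: is =>
    match pvA_inner1 nodes n i (PySem.List.pyRange 1 n 1) with
    | some b => some b
    | none => pvA_loop1 nodes n is

-- inner "for i in range(1, num_nodes)" of A's second loop
def pvA_inner2 (nodes : List (List Int)) (n j : Int) : List Int → Option Bool
  | [] => none
  | i :: is =>
    if pvEdge nodes i j then none
    else if i == n - 1 then some false
    else pvA_inner2 nodes n j is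

-- outer "for j in range(1, num_nodes)" of A's second loop
def pvA_loop2 (nodes : List (List Int)) (n : Int) : List Int → Option Bool
  | [] => none
  | j :: js =>
    match pvA_inner2 nodes n j (PySem.List.pyRange 1 n 1) with
    | some b => some b
    | none => pvA_loop2 nodes n js

def is_done (nodes : List (List Int)) (num_nodes : Int) : Bool :=
  match pvA_loop1 nodes num_nodes (PySem.List.pyRange 0 num_nodes 1) with
  | some b => b
  | none =>
    match pvA_loop2 nodes num_nodes (PySem.List.pyRange 1 num_nodes 1) with
    | some b => b
    | none => true

-- ===== PORT B =====
-- loop body of B's single sweep: maybe set has_out[i] and (for i != 0) has_in[j]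
def pvB_step (nodes : List (List Int)) (st : List Bool × List Bool) (i j : Int) :
    List Bool × List Bool :=
  if pvEdge nodes i j then
    let h1 := st.1.set i.toNat true
    if i == 0 then (h1, st.2) else (h1, st.2.set j.toNat true)
  else st

-- B's "return all(has_out) and all(has_in[1:])"
def pvB_verify (st : List Bool × List Bool) : Bool :=
  st.1.all id && (PySem.List.slice st.2 (some 1) none).all id

def is_done_alt (nodes : List (List Int)) (num_nodes : Int) : Bool :=
  if num_nodes < 2 then true
  else
    pvB_verify
      ((PySem.List.pyRange 0 num_nodes 1).foldl
        (fun st i =>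
          (PySem.List.pyRange 1 num_nodes 1).foldl (fun st j => pvB_step nodes st i j) st)
        (List.replicate num_nodes.toNat false, List.replicate num_nodes.toNat false))

-- ===== PRECONDITION & SPEC =====
-- Pre_ excludes ragged/short matrices on which some access nodes[i][j] (i < num_nodes,
-- 1 <= j < num_nodes) is out of range: there the Python A raises IndexError on most inputs
-- (and on the rest returns False only because an early return precedes the bad access; cite in claim.json).
def Pre_is_done (nodes : List (List Int)) (num_nodes : Int) : Prop :=
  num_nodes < 2 ∨
    (num_nodes ≤ nodes.length ∧ ∀ row ∈ nodes.take num_nodes.toNat, num_nodes ≤ row.length)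
instance (nodes : List (List Int)) (num_nodes : Int) : Decidable (Pre_is_done nodes num_nodes) := by
  unfold Pre_is_done; infer_instance

def pvWitness_is_done : List (List Int) × Int := ([[0, 1], [1, 0]], 2)

def Spec_is_done (nodes : List (List Int)) (num_nodes : Int) (out : Bool) : Prop := out = is_done_alt nodes num_nodes
instance (nodes : List (List Int)) (num_nodes : Int) (out : Bool) : Decidable (Spec_is_done nodes num_nodes out) := by unfold Spec_is_done; infer_instance

-- ===== CLAIM (what is proved, stated in full; the proofs are below) =====
def Claim_equal_is_done : Prop := ∀ (nodes : List (List Int)) (num_nodes : Int), Dom_is_done nodes num_nodes → Pre_is_done nodes num_nodes → Spec_is_done nodes num_nodes (is_done nodes num_nodes)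


-- ===== LEMMAS AND PROOFS =====

theorem pv_beq_of_iff (a b : Bool) (h : a = true ↔ b = true) : a = b := by
  cases a <;> cases b <;> simp_all

-- A's inner j-loop over range(k, n): break iff some edge, else the j == n-1 sentinel fires
theorem pv_inner1_char (nodes : List (List Int)) (n i : Int) :
    ∀ (m : Nat) (k : Int), 1 ≤ k → k < n → (n - k).toNat = m →
      pvA_inner1 nodes n i (PySem.List.pyRange k n 1) =
        if (PySem.List.pyRange k n 1).any (fun j => pvEdge nodes i j) then none
        else some false := by
  intro m
  induction m with
  | zero => intro k _ h2 hm; omega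
  | succ m ih =>
    intro k h1 h2 hm
    rw [PySem.List.pyRange_one_cons h2, List.any_cons]
    by_cases he : pvEdge nodes i k
    · simp [pvA_inner1, he]
    · have he' : pvEdge nodes i k = false := by simpa using he
      rw [he', Bool.false_or]
      by_cases hk : k = n - 1
      · subst hk
        have hnil : PySem.List.pyRange (n - 1 + 1) n 1 = [] :=
          PySem.List.pyRange_one_eq_nil (by omega)
        simp [pvA_inner1, he']
      · have hrec := ih (k + 1) (by omega) (by omega) (by omega)
        simp [pvA_inner1, he', hk, hrec]

theorem pv_inner2_char (nodes : List (List Int)) (n j : Int) :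
    ∀ (m : Nat) (k : Int), 1 ≤ k → k < n → (n - k).toNat = m →
      pvA_inner2 nodes n j (PySem.List.pyRange k n 1) =
        if (PySem.List.pyRange k n 1).any (fun i => pvEdge nodes i j) then none
        else some false := by
  intro m
  induction m with
  | zero => intro k _ h2 hm; omega
  | succ m ih =>
    intro k h1 h2 hm
    rw [PySem.List.pyRange_one_cons h2, List.any_cons]
    by_cases he : pvEdge nodes k j
    · simp [pvA_inner2, he]
    · have he' : pvEdge nodes k j = false := by simpa using he
      rw [he', Bool.false_or]
      by_cases hk : k = n - 1
      · subst hk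
        have hnil : PySem.List.pyRange (n - 1 + 1) n 1 = [] :=
          PySem.List.pyRange_one_eq_nil (by omega)
        simp [pvA_inner2, he']
      · have hrec := ih (k + 1) (by omega) (by omega) (by omega)
        simp [pvA_inner2, he', hk, hrec]

theorem pv_loop1_char (nodes : List (List Int)) (n : Int) (hn : 2 ≤ n) (is : List Int) :
    pvA_loop1 nodes n is =
      if is.all (fun i => (PySem.List.pyRange 1 n 1).any (fun j => pvEdge nodes i j)) then none
      else some false := by
  induction is with
  | nil => simp [pvA_loop1]
  | cons i is ih =>
    have h := pv_inner1_char nodes n i (n - 1).toNat 1 le_rfl (by omega) (by omega)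
    rw [List.all_cons]
    cases ha : ((PySem.List.pyRange 1 n 1).any fun j => pvEdge nodes i j) with
    | true =>
      rw [Bool.true_and]
      simp [pvA_loop1, h, ha, ih]
    | false =>
      rw [Bool.false_and]
      simp [pvA_loop1, h, ha]

theorem pv_loop2_char (nodes : List (List Int)) (n : Int) (hn : 2 ≤ n) (js : List Int) :
    pvA_loop2 nodes n js =
      if js.all (fun j => (PySem.List.pyRange 1 n 1).any (fun i => pvEdge nodes i j)) then none
      else some false := by
  induction js with
  | nil => simp [pvA_loop2]
  | cons j js ih =>
    have h := pv_inner2_char nodes n j (n - 1).toNat 1 le_rfl (by omega) (by omega)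
    rw [List.all_cons]
    cases ha : ((PySem.List.pyRange 1 n 1).any fun i => pvEdge nodes i j) with
    | true =>
      rw [Bool.true_and]
      simp [pvA_loop2, h, ha, ih]
    | false =>
      rw [Bool.false_and]
      simp [pvA_loop2, h, ha]

theorem pv_isdone_char (nodes : List (List Int)) (n : Int) (hn : 2 ≤ n) :
    is_done nodes n =
      ((PySem.List.pyRange 0 n 1).all
          (fun i => (PySem.List.pyRange 1 n 1).any (fun j => pvEdge nodes i j)) &&
        (PySem.List.pyRange 1 n 1).all
          (fun j => (PySem.List.pyRange 1 n 1).any (fun i => pvEdge nodes i j))) := by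
  unfold is_done
  rw [pv_loop1_char nodes n hn, pv_loop2_char nodes n hn]
  by_cases h1 : (PySem.List.pyRange 0 n 1).all
      (fun i => (PySem.List.pyRange 1 n 1).any (fun j => pvEdge nodes i j)) <;>
    by_cases h2 : (PySem.List.pyRange 1 n 1).all
        (fun j => (PySem.List.pyRange 1 n 1).any (fun i => pvEdge nodes i j)) <;>
    simp [h1, h2]

theorem pv_loop1_none (nodes : List (List Int)) (n : Int) (hn : n < 2) (is : List Int) :
    pvA_loop1 nodes n is = none := by
  have h : PySem.List.pyRange 1 n 1 = [] := PySem.List.pyRange_one_eq_nil (by omega)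
  induction is with
  | nil => rfl
  | cons i is ih => simp [pvA_loop1, h, pvA_inner1, ih]

theorem pv_isdone_lt2 (nodes : List (List Int)) (n : Int) (hn : n < 2) :
    is_done nodes n = true := by
  have h : PySem.List.pyRange 1 n 1 = [] := PySem.List.pyRange_one_eq_nil (by omega)
  unfold is_done
  rw [pv_loop1_none nodes n hn, h]
  simp [pvA_loop2]

-- B side: nested fold = fold over the flattened (i, j) stream
theorem pv_nested_eq_pairs (nodes : List (List Int)) (l1 l2 : List Int)
    (init : List Bool × List Bool) :
    l1.foldl (fun st i => l2.foldl (fun st j => pvB_step nodes st i j) st) init =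
      (l1.flatMap (fun i => l2.map (fun j => (i, j)))).foldl
        (fun st p => pvB_step nodes st p.1 p.2) init := by
  induction l1 generalizing init with
  | nil => rfl
  | cons i l1 ih => simp [List.flatMap_cons, List.foldl_append, List.foldl_map, ih]

theorem pv_step_len1 (nodes : List (List Int)) (st : List Bool × List Bool) (i j : Int) :
    (pvB_step nodes st i j).1.length = st.1.length := by
  unfold pvB_step; split_ifs <;> simp

theorem pv_step_len2 (nodes : List (List Int)) (st : List Bool × List Bool) (i j : Int) :
    (pvB_step nodes st i j).2.length = st.2.length := by
  unfold pvB_step; split_ifs <;> simp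

theorem pv_fold_len1 (nodes : List (List Int)) (ps : List (Int × Int)) :
    ∀ st : List Bool × List Bool,
      ((ps.foldl (fun st p => pvB_step nodes st p.1 p.2) st).1.length = st.1.length) := by
  induction ps with
  | nil => intro st; rfl
  | cons p ps ih => intro st; rw [List.foldl_cons, ih, pv_step_len1]

theorem pv_fold_len2 (nodes : List (List Int)) (ps : List (Int × Int)) :
    ∀ st : List Bool × List Bool,
      ((ps.foldl (fun st p => pvB_step nodes st p.1 p.2) st).2.length = st.2.length) := by
  induction ps with
  | nil => intro st; rfl
  | cons p ps ih => intro st; rw [List.foldl_cons, ih, pv_step_len2]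

theorem pv_getD_set (l : List Bool) (m k : Nat) (hm : m < l.length) :
    ((l.set m true)[k]?.getD false) = (l[k]?.getD false || (m == k)) := by
  by_cases hk : m = k
  · subst hk; simp [hm]
  · simp [hk]

theorem pv_fold_fst (nodes : List (List Int)) (ps : List (Int × Int)) :
    ∀ (st : List Bool × List Bool) (k : Nat),
      (∀ p ∈ ps, p.1.toNat < st.1.length) →
      ((ps.foldl (fun st p => pvB_step nodes st p.1 p.2) st).1.getD k false) =
        (st.1.getD k false || ps.any (fun p => pvEdge nodes p.1 p.2 && p.1.toNat == k)) := by
  induction ps with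
  | nil => intro st k _; simp
  | cons p ps ih =>
    intro st k hmem
    have hlen : p.1.toNat < st.1.length := hmem p (by simp)
    have hmem' : ∀ q ∈ ps, q.1.toNat < (pvB_step nodes st p.1 p.2).1.length := by
      intro q hq; rw [pv_step_len1]; exact hmem q (by simp [hq])
    rw [List.foldl_cons, ih _ k hmem']
    have hstep : (pvB_step nodes st p.1 p.2).1.getD k false =
        (st.1.getD k false || (pvEdge nodes p.1 p.2 && p.1.toNat == k)) := by
      unfold pvB_step
      by_cases he : pvEdge nodes p.1 p.2
      · cases h0 : (p.1 == 0) <;>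
          simp [he, pv_getD_set st.1 p.1.toNat k hlen]
      · simp [he]
    rw [hstep, List.any_cons]
    cases st.1.getD k false <;> cases (pvEdge nodes p.1 p.2 && p.1.toNat == k) <;> simp

theorem pv_fold_snd (nodes : List (List Int)) (ps : List (Int × Int)) :
    ∀ (st : List Bool × List Bool) (k : Nat),
      (∀ p ∈ ps, p.2.toNat < st.2.length) →
      ((ps.foldl (fun st p => pvB_step nodes st p.1 p.2) st).2.getD k false) =
        (st.2.getD k false ||
          ps.any (fun p => pvEdge nodes p.1 p.2 && (!(p.1 == 0) && p.2.toNat == k))) := by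
  induction ps with
  | nil => intro st k _; simp
  | cons p ps ih =>
    intro st k hmem
    have hlen : p.2.toNat < st.2.length := hmem p (by simp)
    have hmem' : ∀ q ∈ ps, q.2.toNat < (pvB_step nodes st p.1 p.2).2.length := by
      intro q hq; rw [pv_step_len2]; exact hmem q (by simp [hq])
    rw [List.foldl_cons, ih _ k hmem']
    have hstep : (pvB_step nodes st p.1 p.2).2.getD k false =
        (st.2.getD k false ||
          (pvEdge nodes p.1 p.2 && (!(p.1 == 0) && p.2.toNat == k))) := by
      unfold pvB_step
      by_cases he : pvEdge nodes p.1 p.2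
      · cases h0 : (p.1 == 0) with
        | true => simp [he]
        | false => simp [he, pv_getD_set st.2 p.2.toNat k hlen]
      · simp [he]
    rw [hstep, List.any_cons]
    cases st.2.getD k false <;>
      cases (pvEdge nodes p.1 p.2 && (!(p.1 == 0) && p.2.toNat == k)) <;> simp

theorem pv_all_id (l : List Bool) :
    l.all id = true ↔ ∀ k : Nat, k < l.length → l.getD k false = true := by
  rw [List.all_eq_true]
  constructor
  · intro h k hk
    rw [List.getD_eq_getElem?_getD, List.getElem?_eq_getElem hk]
    exact h _ (List.getElem_mem hk)
  · intro h x hx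
    obtain ⟨k, hk, rfl⟩ := List.mem_iff_getElem.mp hx
    have := h k hk
    rw [List.getD_eq_getElem?_getD, List.getElem?_eq_getElem hk] at this
    exact this

theorem pv_mem_pairs (n : Int) (p : Int × Int) :
    p ∈ (PySem.List.pyRange 0 n 1).flatMap
        (fun i => (PySem.List.pyRange 1 n 1).map (fun j => (i, j))) ↔
      (0 ≤ p.1 ∧ p.1 < n) ∧ (1 ≤ p.2 ∧ p.2 < n) := by
  simp only [List.mem_flatMap, List.mem_map, PySem.List.mem_pyRange_one]
  constructor
  · rintro ⟨a, ha, b, hb, rfl⟩; exact ⟨ha, hb⟩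
  · rintro ⟨h1, h2⟩; exact ⟨p.1, h1, p.2, h2, rfl⟩

theorem pv_main (nodes : List (List Int)) (n : Int) (hn : 2 ≤ n) :
    is_done nodes n = is_done_alt nodes n := by
  rw [pv_isdone_char nodes n hn]
  unfold is_done_alt
  rw [if_neg (by omega : ¬ n < 2)]
  rw [pv_nested_eq_pairs]
  unfold pvB_verify
  rw [PySem.List.slice_from_one]
  have hmem1 : ∀ p ∈ (PySem.List.pyRange 0 n 1).flatMap
      (fun i => (PySem.List.pyRange 1 n 1).map (fun j => (i, j))),
      p.1.toNat <
        ((List.replicate n.toNat false : List Bool),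
          (List.replicate n.toNat false : List Bool)).1.length := by
    intro p hp
    have := (pv_mem_pairs n p).mp hp
    simp only [List.length_replicate]
    omega
  have hmem2 : ∀ p ∈ (PySem.List.pyRange 0 n 1).flatMap
      (fun i => (PySem.List.pyRange 1 n 1).map (fun j => (i, j))),
      p.2.toNat <
        ((List.replicate n.toNat false : List Bool),
          (List.replicate n.toNat false : List Bool)).2.length := by
    intro p hp
    have := (pv_mem_pairs n p).mp hp
    simp only [List.length_replicate]
    omega
  have hlen1 := pv_fold_len1 nodes
    ((PySem.List.pyRange 0 n 1).flatMap
      (fun i => (PySem.List.pyRange 1 n 1).map (fun j => (i, j))))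
    ((List.replicate n.toNat false : List Bool), (List.replicate n.toNat false : List Bool))
  have hlen2 := pv_fold_len2 nodes
    ((PySem.List.pyRange 0 n 1).flatMap
      (fun i => (PySem.List.pyRange 1 n 1).map (fun j => (i, j))))
    ((List.replicate n.toNat false : List Bool), (List.replicate n.toNat false : List Bool))
  have e1 : (PySem.List.pyRange 0 n 1).all
        (fun i => (PySem.List.pyRange 1 n 1).any (fun j => pvEdge nodes i j)) =
      ((((PySem.List.pyRange 0 n 1).flatMap
          (fun i => (PySem.List.pyRange 1 n 1).map (fun j => (i, j)))).foldl
          (fun st p => pvB_step nodes st p.1 p.2)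
          ((List.replicate n.toNat false : List Bool),
            (List.replicate n.toNat false : List Bool))).1.all id) := by
    apply pv_beq_of_iff
    rw [pv_all_id]
    constructor
    · intro hall k hk
      rw [hlen1, List.length_replicate] at hk
      rw [pv_fold_fst nodes _ _ k hmem1]
      have h0 : ((List.replicate n.toNat false : List Bool).getD k false) = false := by
        simp
      rw [h0, Bool.false_or, List.any_eq_true]
      have hi : ((k : Int) ∈ PySem.List.pyRange 0 n 1) := by
        rw [PySem.List.mem_pyRange_one]; omega
      have hany := List.all_eq_true.mp hall _ hi
      rw [List.any_eq_true] at hany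
      obtain ⟨j, hj, hej⟩ := hany
      refine ⟨((k : Int), j), (pv_mem_pairs n _).mpr ⟨⟨by omega, by omega⟩,
        PySem.List.mem_pyRange_one.mp hj⟩, ?_⟩
      simp [hej]
    · intro h
      rw [List.all_eq_true]
      intro i hi
      rw [PySem.List.mem_pyRange_one] at hi
      have hk : i.toNat < n.toNat := by omega
      have hthis := h i.toNat (by rw [hlen1, List.length_replicate]; exact hk)
      rw [pv_fold_fst nodes _ _ i.toNat hmem1] at hthis
      have h0 : ((List.replicate n.toNat false : List Bool).getD i.toNat false) = false := by
        simp
      rw [h0, Bool.false_or, List.any_eq_true] at hthis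
      obtain ⟨p, hp, hf⟩ := hthis
      have hpm := (pv_mem_pairs n p).mp hp
      rw [Bool.and_eq_true, beq_iff_eq] at hf
      have hp1 : p.1 = i := by omega
      rw [List.any_eq_true]
      exact ⟨p.2, PySem.List.mem_pyRange_one.mpr hpm.2, by rw [← hp1]; exact hf.1⟩
  have e2 : (PySem.List.pyRange 1 n 1).all
        (fun j => (PySem.List.pyRange 1 n 1).any (fun i => pvEdge nodes i j)) =
      ((((PySem.List.pyRange 0 n 1).flatMap
          (fun i => (PySem.List.pyRange 1 n 1).map (fun j => (i, j)))).foldl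
          (fun st p => pvB_step nodes st p.1 p.2)
          ((List.replicate n.toNat false : List Bool),
            (List.replicate n.toNat false : List Bool))).2.tail.all id) := by
    apply pv_beq_of_iff
    rw [pv_all_id]
    have htail : ∀ (l : List Bool) (k : Nat), l.tail.getD k false = l.getD (1 + k) false := by
      intro l k
      rw [List.getD_eq_getElem?_getD, List.getD_eq_getElem?_getD, ← List.drop_one,
        List.getElem?_drop]
    constructor
    · intro hall k hk
      rw [List.length_tail, hlen2, List.length_replicate] at hk
      rw [htail, pv_fold_snd nodes _ _ (1 + k) hmem2]
      have hc : 1 + k < n.toNat := by omega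
      have h0 : ((List.replicate n.toNat false : List Bool).getD (1 + k) false) = false := by
        simp
      rw [h0, Bool.false_or, List.any_eq_true]
      have hj : (((1 + k : Nat) : Int) ∈ PySem.List.pyRange 1 n 1) := by
        rw [PySem.List.mem_pyRange_one]; omega
      have hany := List.all_eq_true.mp hall _ hj
      rw [List.any_eq_true] at hany
      obtain ⟨i, hi, hei⟩ := hany
      rw [PySem.List.mem_pyRange_one] at hi
      refine ⟨(i, ((1 + k : Nat) : Int)), (pv_mem_pairs n _).mpr ⟨⟨by omega, by omega⟩,
        ⟨by omega, by omega⟩⟩, ?_⟩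
      have hi0 : (i == 0) = false := by simp; omega
      simp [hi0]
      refine ⟨?_, by omega⟩
      have hcast : (1 : Int) + (k : Int) = ((1 + k : Nat) : Int) := by push_cast; ring
      rw [hcast]
      exact hei
    · intro h
      rw [List.all_eq_true]
      intro j hj
      rw [PySem.List.mem_pyRange_one] at hj
      have hk : j.toNat - 1 < n.toNat - 1 := by omega
      have hthis := h (j.toNat - 1)
        (by rw [List.length_tail, hlen2, List.length_replicate]; omega)
      rw [htail, pv_fold_snd nodes _ _ (1 + (j.toNat - 1)) hmem2] at hthis
      have hc : 1 + (j.toNat - 1) = j.toNat := by omega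
      have h0 : ((List.replicate n.toNat false : List Bool).getD (1 + (j.toNat - 1)) false)
          = false := by
        rw [hc]; simp
      rw [h0, Bool.false_or, List.any_eq_true] at hthis
      obtain ⟨p, hp, hf⟩ := hthis
      have hpm := (pv_mem_pairs n p).mp hp
      simp only [Bool.and_eq_true, Bool.not_eq_eq_eq_not, Bool.not_true, beq_iff_eq,
        beq_eq_false_iff_ne, ne_eq] at hf
      have hp2 : p.2 = j := by omega
      have hp1 : 1 ≤ p.1 := by
        rcases hf with ⟨_, hne, _⟩
        omega
      rw [List.any_eq_true]
      exact ⟨p.1, PySem.List.mem_pyRange_one.mpr ⟨hp1, hpm.1.2⟩, by rw [← hp2]; exact hf.1⟩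
  rw [e1, e2]

-- ===== VERDICT (by name: the statement is the Claim_ definition above) =====
theorem is_done_spec : Claim_equal_is_done := by
  intro nodes n _ _
  unfold Spec_is_done
  by_cases hn : n < 2
  · rw [pv_isdone_lt2 nodes n hn]
    unfold is_done_alt
    rw [if_pos hn]
  · exact pv_main nodes n (by omega)
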